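-- pv_equiv track=rewrite | github.com/Schweik7/11jagsaw | balanced_solver.py | _normalize_shape
-- ===== SOURCE A (Python) =====
-- from typing import List, Tuple, Dict, Set, Optional
--
-- def _normalize_shape(shape: List[List[int]]) -> List[List[int]]:
--     """标准化形状"""
--     # 找到边界
--     occupied_rows = [i for i in range(len(shape)) if any(shape[i])]
--     if not occupied_rows:
--         return [[]]
--
--     min_row, max_row = min(occupied_rows), max(occupied_rows)
--     occupied_cols = [j for j in range(len(shape[0]))
--                     if any(shape[i][j] for i in range(len(shape)))]
--     min_col, max_col = min(occupied_cols), max(occupied_cols)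
--
--     return [[shape[i][j] for j in range(min_col, max_col + 1)]
--             for i in range(min_row, max_row + 1)]
-- ===== SOURCE B (Python) =====
-- from typing import List
--
--
-- def _normalize_shape(shape: List[List[int]]) -> List[List[int]]:
--     """Trim by peeling empty border rows, then transpose, peel empty border
--     columns the same way, and transpose back."""
--     def peel(rows):
--         rows = [list(r) for r in rows]
--         while rows and not any(rows[0]):
--             rows.pop(0)
--         while rows and not any(rows[-1]):
--             rows.pop()
--         return rows
--
--     rows = peel(shape)
--     if not rows:
--         return [[]]
--     cols = peel(zip(*rows))
--     return [list(r) for r in zip(*cols)]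
-- ===== Notes on version B (the rewrite author's own statement) =====
-- stated objective: alternative
-- what changed: A computes the index lists of occupied rows and occupied columns, takes their min/max and rebuilds the box by double indexing; B never computes indices or extrema: it peels all-zero border rows off both ends of the list, transposes with zip, peels all-zero border columns the same way, and transposes back.
-- outside the precondition, e.g. on _normalize_shape([[0, 1], [1]]): A raises IndexError, B returns [[0], [1]]; on _normalize_shape([[0], [1, 1, 0]]): A returns [[1]], B returns [[1, 1]]
import Mathlib
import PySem

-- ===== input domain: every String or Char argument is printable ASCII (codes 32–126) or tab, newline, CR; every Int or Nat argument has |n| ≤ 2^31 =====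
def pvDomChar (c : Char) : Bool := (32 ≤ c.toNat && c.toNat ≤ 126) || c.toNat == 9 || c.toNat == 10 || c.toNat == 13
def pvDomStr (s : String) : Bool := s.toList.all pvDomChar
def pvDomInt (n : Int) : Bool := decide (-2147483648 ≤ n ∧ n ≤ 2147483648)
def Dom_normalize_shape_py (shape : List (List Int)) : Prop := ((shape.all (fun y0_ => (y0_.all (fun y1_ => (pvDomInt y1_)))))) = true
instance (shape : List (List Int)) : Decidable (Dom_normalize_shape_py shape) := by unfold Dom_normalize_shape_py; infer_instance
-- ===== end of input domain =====

-- B trims by PEELING: drop all-zero border rows from both ends, transpose, peel the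
-- all-zero border columns the same way, transpose back — no indices and no min/max,
-- unlike A's occupied-index scans; objective: alternative decomposition.

-- ===== PORT A =====
-- pyGetD with defaults is exact here: under Pre_ (rectangular shape) every index A
-- forms is in range, and the min?/max?.getD 0 sit behind the nonempty-list guard.
def normalize_shape_py (shape : List (List Int)) : List (List Int) :=
  let n : Int := PySem.List.len shape
  let occupied_rows : List Int :=
    (PySem.List.pyRange 0 n 1).filter
      (fun i => (PySem.List.pyGetD shape i []).any (fun v => v ≠ 0))
  if occupied_rows = [] then [[]]
  else
    let min_row : Int := (PySem.List.min? occupied_rows (fun x => x)).getD 0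
    let max_row : Int := (PySem.List.max? occupied_rows (fun x => x)).getD 0
    let w : Int := PySem.List.len (PySem.List.pyGetD shape 0 [])
    let occupied_cols : List Int :=
      (PySem.List.pyRange 0 w 1).filter
        (fun j => (PySem.List.pyRange 0 n 1).any
          (fun i => PySem.List.pyGetD (PySem.List.pyGetD shape i []) j 0 ≠ 0))
    let min_col : Int := (PySem.List.min? occupied_cols (fun x => x)).getD 0
    let max_col : Int := (PySem.List.max? occupied_cols (fun x => x)).getD 0
    (PySem.List.pyRange min_row (max_row + 1) 1).map (fun i =>
      (PySem.List.pyRange min_col (max_col + 1) 1).map (fun j =>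
        PySem.List.pyGetD (PySem.List.pyGetD shape i []) j 0))

-- ===== PORT B =====
-- `not any(row)`: the peel condition — the row holds no truthy cell
def zrow (row : List Int) : Bool := !row.any (fun v => decide (v ≠ 0))
-- peel: the two while-pop loops — dropWhile at the front, then dropWhile on the reverse
def peel (rows : List (List Int)) : List (List Int) :=
  ((rows.dropWhile zrow).reverse.dropWhile zrow).reverse
-- zip(*rows): truncate to the shortest row; column j collects the j-th cell of each row
-- (the getD default is never read: j ranges below every row's length)
def pyZipT (rows : List (List Int)) : List (List Int) :=
  (List.range (((rows.map List.length).min?).getD 0)).map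
    (fun j => rows.map (fun r => r.getD j 0))

def normalize_shape_py_alt (shape : List (List Int)) : List (List Int) :=
  let rows := peel shape
  if rows = [] then [[]]
  else pyZipT (peel (pyZipT rows))

-- ===== PRECONDITION & SPEC =====
-- Pre_ excludes ragged (non-rectangular) shapes that contain a nonzero cell — the natural
-- domain of this grid function is rectangular: on ragged input A's column scan is accidentally
-- bounded by row 0's length, so A raises IndexError in some layouts and silently truncates the
-- output in others, while B's zip-based peel truncates to the shortest row.
def Pre_normalize_shape_py (shape : List (List Int)) : Prop :=
  (∀ row ∈ shape, row.length = (shape.headD []).length) ∨ (∀ row ∈ shape, ∀ v ∈ row, v = 0)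
instance (shape : List (List Int)) : Decidable (Pre_normalize_shape_py shape) := by
  unfold Pre_normalize_shape_py; infer_instance
def pvWitness_normalize_shape_py : List (List Int) := [[0, 1, 0], [1, 1, 0], [0, 0, 0]]
def Spec_normalize_shape_py (shape : List (List Int)) (out : List (List Int)) : Prop := out = normalize_shape_py_alt shape
instance (shape : List (List Int)) (out : List (List Int)) : Decidable (Spec_normalize_shape_py shape out) := by unfold Spec_normalize_shape_py; infer_instance

-- ===== CLAIM (what is proved, stated in full; the proofs are below) =====
def Claim_equal_normalize_shape_py : Prop := ∀ (shape : List (List Int)), Dom_normalize_shape_py shape → Pre_normalize_shape_py shape → Spec_normalize_shape_py shape (normalize_shape_py shape)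

-- ===== LEMMAS AND PROOFS =====

-- row i of xs is occupied / column j of xs is occupied (Nat indices)
def RowT (xs : List (List Int)) (i : Nat) : Prop :=
  i < xs.length ∧ ∃ v ∈ xs.getD i [], v ≠ 0
def ColT (xs : List (List Int)) (j : Nat) : Prop :=
  ∃ i, i < xs.length ∧ (xs.getD i []).getD j 0 ≠ 0

theorem getD_ne_lt {l : List Int} {j : Nat} (h : l.getD j 0 ≠ 0) : j < l.length := by
  by_contra hb
  have : l.length ≤ j := by omega
  simp [List.getD_eq_getElem?_getD, List.getElem?_eq_none this] at h

theorem getD_mem {α : Type} {l : List α} {j : Nat} (h : j < l.length) (d : α) : l.getD j d ∈ l := by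
  rw [List.getD_eq_getElem _ _ h]; exact List.getElem_mem h

theorem headD_eq_getD {α : Type} (l : List α) (d : α) : l.headD d = l.getD 0 d := by
  cases l <;> simp

theorem map_range_getD {α β : Type} (xs : List α) (d : α) (f : α → β) (a b : Nat)
    (hb : b ≤ xs.length) :
    (PySem.List.pyRange (a : Int) (b : Int) 1).map (fun i => f (PySem.List.pyGetD xs i d)) =
      ((xs.drop a).take (b - a)).map f := by
  apply List.ext_getElem
  · simp [PySem.List.length_pyRange_one]; omega
  · intro k h1 h2
    have hk : a + k < b := by
      simp [PySem.List.length_pyRange_one] at h1; omega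
    simp only [List.getElem_map, PySem.List.getElem_pyRange_one, List.getElem_take,
      List.getElem_drop]
    have e : (a : Int) + (k : Int) = ((a + k : Nat) : Int) := by push_cast; ring
    rw [e, PySem.List.pyGetD_natCast, List.getD_eq_getElem _ _ (by omega)]

theorem filter_range_min (n : Nat) (p : Int → Bool) (M : Nat) (hM : M < n) (hpM : p M = true)
    (hmin : ∀ k : Nat, k < n → p k = true → M ≤ k) :
    PySem.List.min? ((PySem.List.pyRange 0 (n : Int) 1).filter p) (fun x => x) = some (M : Int) := by
  have hmem : (M : Int) ∈ (PySem.List.pyRange 0 (n : Int) 1).filter p :=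
    List.mem_filter.mpr ⟨PySem.List.mem_pyRange_one.mpr ⟨by positivity, by exact_mod_cast hM⟩, hpM⟩
  cases hm : PySem.List.min? ((PySem.List.pyRange 0 (n : Int) 1).filter p) (fun x => x) with
  | none =>
    rw [(PySem.List.min?_eq_none_iff _ _).mp hm] at hmem
    simp at hmem
  | some m =>
    have hmmem := PySem.List.min?_mem hm
    have hle := PySem.List.min?_isMin hm
    obtain ⟨hr, hp⟩ := List.mem_filter.mp hmmem
    obtain ⟨h0, hlt⟩ := PySem.List.mem_pyRange_one.mp hr
    have hMk : M ≤ m.toNat := by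
      refine hmin m.toNat (by omega) ?_
      rwa [Int.toNat_of_nonneg h0]
    have : m = (M : Int) := le_antisymm (hle _ hmem) (by omega)
    rw [this]

theorem filter_range_max (n : Nat) (p : Int → Bool) (M : Nat) (hM : M < n) (hpM : p M = true)
    (hmax : ∀ k : Nat, k < n → p k = true → k ≤ M) :
    PySem.List.max? ((PySem.List.pyRange 0 (n : Int) 1).filter p) (fun x => x) = some (M : Int) := by
  have hmem : (M : Int) ∈ (PySem.List.pyRange 0 (n : Int) 1).filter p :=
    List.mem_filter.mpr ⟨PySem.List.mem_pyRange_one.mpr ⟨by positivity, by exact_mod_cast hM⟩, hpM⟩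
  cases hm : PySem.List.max? ((PySem.List.pyRange 0 (n : Int) 1).filter p) (fun x => x) with
  | none =>
    rw [(PySem.List.max?_eq_none_iff _ _).mp hm] at hmem
    simp at hmem
  | some m =>
    have hmmem := PySem.List.max?_mem hm
    have hle := PySem.List.max?_isMax hm
    obtain ⟨hr, hp⟩ := List.mem_filter.mp hmmem
    obtain ⟨h0, hlt⟩ := PySem.List.mem_pyRange_one.mp hr
    have hMk : m.toNat ≤ M := by
      refine hmax m.toNat (by omega) ?_
      rwa [Int.toNat_of_nonneg h0]
    have : m = (M : Int) := le_antisymm (by omega) (hle _ hmem)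
    rw [this]

theorem rowPred_iff (shape : List (List Int)) (k : Nat) :
    ((PySem.List.pyGetD shape (k : Int) []).any (fun v => decide (v ≠ 0)) = true) ↔
      RowT shape k := by
  rw [PySem.List.pyGetD_natCast]
  simp only [List.any_eq_true, decide_eq_true_eq]
  constructor
  · rintro ⟨v, hv, hne⟩
    refine ⟨?_, v, hv, hne⟩
    by_contra h
    rw [List.getD_eq_getElem?_getD, List.getElem?_eq_none (by omega)] at hv
    simp at hv
  · rintro ⟨_, hv⟩; exact hv

theorem colPred_iff (shape : List (List Int)) (k : Nat) :
    (((PySem.List.pyRange 0 (PySem.List.len shape) 1).any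
        (fun i => decide (PySem.List.pyGetD (PySem.List.pyGetD shape i []) (k : Int) 0 ≠ 0))) = true)
      ↔ ColT shape k := by
  simp only [List.any_eq_true, decide_eq_true_eq, PySem.List.len_eq]
  constructor
  · rintro ⟨i, hi, hc⟩
    obtain ⟨h0, hlt⟩ := PySem.List.mem_pyRange_one.mp hi
    refine ⟨i.toNat, by omega, ?_⟩
    rw [← Int.toNat_of_nonneg h0, PySem.List.pyGetD_natCast, PySem.List.pyGetD_natCast] at hc
    exact hc
  · rintro ⟨i, hi, hc⟩
    refine ⟨(i : Int), PySem.List.mem_pyRange_one.mpr ⟨by positivity, by exact_mod_cast hi⟩, ?_⟩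
    rw [PySem.List.pyGetD_natCast, PySem.List.pyGetD_natCast]
    exact hc

-- zrow reads 'the row is all zero'
theorem zrow_eq_false_iff (row : List Int) : zrow row = false ↔ ∃ v ∈ row, v ≠ 0 := by
  simp [zrow]

theorem zrow_eq_true_iff (row : List Int) : zrow row = true ↔ ∀ v ∈ row, v = 0 := by
  simp [zrow]

-- a while-pop-front loop that stops at index k is a drop
theorem dropWhile_eq_drop {α : Type} (p : α → Bool) (l : List α) (k : Nat) (d : α)
    (hk : k < l.length) (hall : ∀ i, i < k → p (l.getD i d) = true)
    (hstop : p (l.getD k d) = false) : l.dropWhile p = l.drop k := by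
  induction l generalizing k with
  | nil => simp at hk
  | cons x xs ih =>
    cases k with
    | zero =>
      simp only [List.getD_cons_zero] at hstop
      simp [hstop]
    | succ k' =>
      have hx : p x = true := by
        have := hall 0 (by omega)
        simpa using this
      rw [List.dropWhile_cons, hx, List.drop_succ_cons]
      exact ih k' (by simpa using hk)
        (fun i hi => by have := hall (i + 1) (by omega); simpa using this)
        (by simpa using hstop)

-- reversing flips getD indices
theorem getD_reverse {α : Type} (l : List α) (i : Nat) (d : α) (h : i < l.length) :
    l.reverse.getD i d = l.getD (l.length - 1 - i) d := by
  rw [List.getD_eq_getElem _ _ (by simpa using h), List.getD_eq_getElem _ _ (by omega),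
    List.getElem_reverse]

-- min of a nonempty constant list
theorem min?_const (l : List Nat) (w : Nat) (hne : l ≠ []) (h : ∀ y ∈ l, y = w) :
    l.min? = some w := by
  cases l with
  | nil => exact absurd rfl hne
  | cons x xs =>
    rw [List.min?_cons']
    have hx : x = w := h x (by simp)
    subst hx
    congr 1
    have hfold : ∀ (t : List Nat), (∀ y ∈ t, y = x) → List.foldl min x t = x := by
      intro t
      induction t with
      | nil => intro _; rfl
      | cons a t ih =>
        intro ht
        have ha : a = x := ht a (by simp)
        subst ha
        simp only [List.foldl_cons, min_self]
        exact ih (fun y hy => ht y (by simp [hy]))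
    exact hfold xs (fun y hy => h y (by simp [hy]))

-- zip(*rows) on a nonempty block of constant width w
theorem pyZipT_eq (rows : List (List Int)) (w : Nat) (hne : rows ≠ [])
    (hw : ∀ r ∈ rows, r.length = w) :
    pyZipT rows = (List.range w).map (fun j => rows.map (fun r => r.getD j 0)) := by
  unfold pyZipT
  have hmin : (rows.map List.length).min? = some w :=
    min?_const _ _ (by simpa using hne)
      (by intro y hy; obtain ⟨r, hr, rfl⟩ := List.mem_map.mp hy; exact hw r hr)
  rw [hmin]
  rfl

-- ===== VERDICT (by name: the statement is the Claim_ definition above) =====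
theorem normalize_shape_py_spec : Claim_equal_normalize_shape_py := by
  intro shape _ hpre
  unfold Spec_normalize_shape_py
  by_cases hz : ∀ r ∈ shape, ∀ v ∈ r, v = 0
  · -- all-zero: both sides return [[]]
    have hAocc : ((PySem.List.pyRange 0 (PySem.List.len shape) 1).filter
        (fun i => (PySem.List.pyGetD shape i []).any (fun v => decide (v ≠ 0)))) = [] := by
      apply List.filter_eq_nil_iff.mpr
      intro i hi
      obtain ⟨h0, hlt⟩ := PySem.List.mem_pyRange_one.mp hi
      intro hc
      rw [← Int.toNat_of_nonneg h0] at hc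
      obtain ⟨hl, v, hv, hne⟩ := (rowPred_iff shape i.toNat).mp hc
      exact hne (hz _ (getD_mem hl []) v hv)
    have hBdrop : shape.dropWhile zrow = [] :=
      List.dropWhile_eq_nil_iff.mpr (fun r hr => (zrow_eq_true_iff r).mpr (hz r hr))
    simp only [normalize_shape_py, normalize_shape_py_alt, peel, hAocc, hBdrop]
    simp
  · push Not at hz
    obtain ⟨r, hr, v, hv, hvne⟩ := hz
    -- an occupied row exists
    have hex : ∃ i, RowT shape i := by
      obtain ⟨i, hi, rfl⟩ := List.mem_iff_getElem.mp hr
      exact ⟨i, hi, v, by rwa [List.getD_eq_getElem _ _ hi], hvne⟩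
    letI : DecidablePred (RowT shape) := Classical.decPred _
    letI : DecidablePred (ColT shape) := Classical.decPred _
    -- the shape is rectangular (the all-zero disjunct of Pre_ is impossible)
    have hpre' : ∀ row ∈ shape, row.length = (shape.headD []).length := by
      rcases hpre with h | h
      · exact h
      · exact absurd (h r hr v hv) hvne
    have hW : ∀ k, k < shape.length →
        (shape.getD k []).length = (shape.getD 0 []).length := by
      intro k hk
      rw [← headD_eq_getD]
      exact hpre' _ (getD_mem hk [])
    set w := (shape.getD 0 []).length with hw_def
    -- row extrema
    set R0 := Nat.find hex with hR0_def
    have hR0 : RowT shape R0 := Nat.find_spec hex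
    have hR0min : ∀ i, RowT shape i → R0 ≤ i := fun i h => Nat.find_min' hex h
    have hR0not : ∀ i, i < R0 → ¬ RowT shape i := fun i hi => Nat.find_min hex hi
    have hR0lt : R0 < shape.length := hR0.1
    set R1 := Nat.findGreatest (fun i => RowT shape i) (shape.length - 1) with hR1_def
    have hR1 : RowT shape R1 :=
      Nat.findGreatest_spec (m := R0) (by omega) hR0
    have hR1lt : R1 < shape.length := hR1.1
    have hR1max : ∀ i, RowT shape i → i ≤ R1 := by
      intro i h
      by_contra hc
      push Not at hc
      exact Nat.findGreatest_is_greatest hc (by have := h.1; omega) h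
    have hR1not : ∀ i, R1 < i → ¬ RowT shape i := fun i hi h => absurd (hR1max i h) (by omega)
    have hR0R1 : R0 ≤ R1 := hR1max R0 hR0
    -- column extrema
    have hexC : ∃ j, ColT shape j := by
      obtain ⟨hl, v', hv', hvne'⟩ := hR0
      obtain ⟨j, hj, hje⟩ := List.mem_iff_getElem.mp hv'
      exact ⟨j, R0, hl, by rw [List.getD_eq_getElem _ _ hj, hje]; exact hvne'⟩
    have hcol_lt : ∀ j, ColT shape j → j < w := by
      intro j hj
      obtain ⟨i, hi, hc⟩ := hj
      have := getD_ne_lt hc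
      rwa [hW i hi] at this
    set C0 := Nat.find hexC with hC0_def
    have hC0 : ColT shape C0 := Nat.find_spec hexC
    have hC0not : ∀ j, j < C0 → ¬ ColT shape j := fun j hj => Nat.find_min hexC hj
    have hC0min : ∀ j, ColT shape j → C0 ≤ j := fun j h => Nat.find_min' hexC h
    have hC0lt : C0 < w := hcol_lt _ hC0
    set C1 := Nat.findGreatest (fun j => ColT shape j) (w - 1) with hC1_def
    have hC1 : ColT shape C1 :=
      Nat.findGreatest_spec (m := C0) (by omega) hC0
    have hC1lt : C1 < w := hcol_lt _ hC1
    have hC1max : ∀ j, ColT shape j → j ≤ C1 := by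
      intro j h
      by_contra hc
      push Not at hc
      exact Nat.findGreatest_is_greatest hc (by have := hcol_lt j h; omega) h
    have hC1not : ∀ j, C1 < j → ¬ ColT shape j := fun j hj h => absurd (hC1max j h) (by omega)
    have hC0C1 : C0 ≤ C1 := hC1max C0 hC0
    -- ===== A side: reduce to the bounding-box slice =====
    have hmemR0 : ((R0 : Nat) : Int) ∈ (PySem.List.pyRange 0 (PySem.List.len shape) 1).filter
        (fun i => (PySem.List.pyGetD shape i []).any (fun v => decide (v ≠ 0))) := by
      refine List.mem_filter.mpr ⟨?_, (rowPred_iff shape R0).mpr hR0⟩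
      simp only [PySem.List.len_eq]
      exact PySem.List.mem_pyRange_one.mpr ⟨by positivity, by exact_mod_cast hR0lt⟩
    have hocc_ne : ((PySem.List.pyRange 0 (PySem.List.len shape) 1).filter
        (fun i => (PySem.List.pyGetD shape i []).any (fun v => decide (v ≠ 0)))) ≠ [] :=
      List.ne_nil_of_mem hmemR0
    have hminR : PySem.List.min? ((PySem.List.pyRange 0 (PySem.List.len shape) 1).filter
        (fun i => (PySem.List.pyGetD shape i []).any (fun v => decide (v ≠ 0)))) (fun x => x)
        = some (R0 : Int) := by
      simp only [PySem.List.len_eq]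
      exact filter_range_min _ _ _ hR0lt ((rowPred_iff shape R0).mpr hR0)
        (fun k _ hp => hR0min k ((rowPred_iff shape k).mp hp))
    have hmaxR : PySem.List.max? ((PySem.List.pyRange 0 (PySem.List.len shape) 1).filter
        (fun i => (PySem.List.pyGetD shape i []).any (fun v => decide (v ≠ 0)))) (fun x => x)
        = some (R1 : Int) := by
      simp only [PySem.List.len_eq]
      exact filter_range_max _ _ _ hR1lt ((rowPred_iff shape R1).mpr hR1)
        (fun k _ hp => hR1max k ((rowPred_iff shape k).mp hp))
    have hminC : PySem.List.min? (((PySem.List.pyRange 0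
          (PySem.List.len (PySem.List.pyGetD shape 0 [])) 1)).filter
        (fun j => (PySem.List.pyRange 0 (PySem.List.len shape) 1).any
          (fun i => decide (PySem.List.pyGetD (PySem.List.pyGetD shape i []) j 0 ≠ 0))))
        (fun x => x) = some (C0 : Int) := by
      have e : PySem.List.pyGetD shape (0 : Int) [] = shape.getD 0 [] := by
        simpa using PySem.List.pyGetD_natCast shape 0 []
      rw [e]
      simp only [PySem.List.len_eq]
      refine filter_range_min _ _ _ hC0lt ((colPred_iff shape C0).mpr hC0) ?_
      exact fun k _ hp => hC0min k ((colPred_iff shape k).mp hp)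
    have hmaxC : PySem.List.max? (((PySem.List.pyRange 0
          (PySem.List.len (PySem.List.pyGetD shape 0 [])) 1)).filter
        (fun j => (PySem.List.pyRange 0 (PySem.List.len shape) 1).any
          (fun i => decide (PySem.List.pyGetD (PySem.List.pyGetD shape i []) j 0 ≠ 0))))
        (fun x => x) = some (C1 : Int) := by
      have e : PySem.List.pyGetD shape (0 : Int) [] = shape.getD 0 [] := by
        simpa using PySem.List.pyGetD_natCast shape 0 []
      rw [e]
      simp only [PySem.List.len_eq]
      refine filter_range_max _ _ _ hC1lt ((colPred_iff shape C1).mpr hC1) ?_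
      exact fun k _ hp => hC1max k ((colPred_iff shape k).mp hp)
    simp only [normalize_shape_py, hminR, hmaxR, hminC, hmaxC, if_neg hocc_ne, Option.getD_some]
    have ecast1 : ((R1 : Int) + 1) = ((R1 + 1 : Nat) : Int) := by push_cast; ring
    have ecast2 : ((C1 : Int) + 1) = ((C1 + 1 : Nat) : Int) := by push_cast; ring
    rw [ecast1, ecast2, map_range_getD shape []
      (fun row => (PySem.List.pyRange ((C0 : Nat) : Int) (((C1 + 1 : Nat)) : Int) 1).map
        (fun j => PySem.List.pyGetD row j 0)) R0 (R1 + 1) (by omega)]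
    set block := (shape.drop R0).take (R1 + 1 - R0) with hblock_def
    have hblock_mem : ∀ r ∈ block, r.length = w := by
      intro r hrb
      rw [hpre' r (List.mem_of_mem_drop (List.mem_of_mem_take hrb)), headD_eq_getD]
    have hblen : block.length = R1 + 1 - R0 := by
      rw [hblock_def]
      simp
      omega
    have hbne : block ≠ [] := by
      intro hcon
      rw [hcon] at hblen
      simp at hblen
      omega
    have hbget : ∀ (i : Nat) (h : i < block.length),
        block[i] = shape.getD (R0 + i) [] := by
      intro i h
      have h' : i < ((shape.drop R0).take (R1 + 1 - R0)).length := h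
      calc block[i] = ((shape.drop R0).take (R1 + 1 - R0))[i]'h' := rfl
        _ = shape.getD (R0 + i) [] := by
          rw [List.getElem_take, List.getElem_drop,
            List.getD_eq_getElem _ _ (by simp at h'; omega)]
    -- A's inner map is a row slice
    have hAinner : ∀ r ∈ block,
        (PySem.List.pyRange ((C0 : Nat) : Int) (((C1 + 1 : Nat)) : Int) 1).map
          (fun j => PySem.List.pyGetD r j 0) = (r.drop C0).take (C1 + 1 - C0) := by
      intro r hrb
      have := map_range_getD r 0 (fun x => x) C0 (C1 + 1) (by rw [hblock_mem r hrb]; omega)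
      simpa using this
    rw [List.map_congr_left hAinner]
    -- ===== B side =====
    have hzrow_of_not : ∀ t, t < shape.length → ¬ RowT shape t →
        zrow (shape.getD t []) = true := by
      intro t ht hnt
      refine (zrow_eq_true_iff _).mpr ?_
      intro v' hv'
      by_contra hvne'
      exact hnt ⟨ht, v', hv', hvne'⟩
    have hBpeel : peel shape = block := by
      unfold peel
      have hdw : shape.dropWhile zrow = shape.drop R0 :=
        dropWhile_eq_drop zrow shape R0 [] hR0lt
          (fun i hi => hzrow_of_not i (by omega) (hR0not i hi))
          ((zrow_eq_false_iff _).mpr hR0.2)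
      rw [hdw]
      have hmlen : (shape.drop R0).length = shape.length - R0 := by simp
      have hmget : ∀ i, i < (shape.drop R0).length →
          (shape.drop R0).getD i [] = shape.getD (R0 + i) [] := by
        intro i h
        rw [List.getD_eq_getElem _ _ h, List.getElem_drop,
          List.getD_eq_getElem _ _ (by simp at h; omega)]
      have hdw2 : (shape.drop R0).reverse.dropWhile zrow =
          (shape.drop R0).reverse.drop (shape.length - 1 - R1) := by
        apply dropWhile_eq_drop zrow _ _ []
        · simp; omega
        · intro i hi
          rw [getD_reverse _ _ _ (by simp; omega), hmget _ (by simp; omega)]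
          exact hzrow_of_not _ (by omega) (hR1not _ (by simp; omega))
        · rw [getD_reverse _ _ _ (by simp; omega), hmget _ (by simp; omega)]
          have he : R0 + ((shape.drop R0).length - 1 - (shape.length - 1 - R1)) = R1 := by
            simp; omega
          rw [he]
          exact (zrow_eq_false_iff _).mpr hR1.2
      rw [hdw2, List.drop_reverse, List.reverse_reverse]
      have he2 : (shape.drop R0).length - (shape.length - 1 - R1) = R1 + 1 - R0 := by
        simp; omega
      rw [he2]
    -- cols0 = zip(*block)
    have hcols0 : pyZipT block =
        (List.range w).map (fun j => block.map (fun r => r.getD j 0)) :=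
      pyZipT_eq block w hbne hblock_mem
    have hc0len : (pyZipT block).length = w := by rw [hcols0]; simp
    have hc0get : ∀ j, j < w → (pyZipT block).getD j [] = block.map (fun r => r.getD j 0) := by
      intro j hj
      rw [hcols0, List.getD_eq_getElem _ _ (by simpa using hj)]
      simp
    -- a peeled column is all-zero iff its shape column is unoccupied
    have hcolzrow : ∀ j, (zrow (block.map (fun r => r.getD j 0)) = false ↔ ColT shape j) := by
      intro j
      rw [zrow_eq_false_iff]
      constructor
      · rintro ⟨x, hx, hne⟩
        obtain ⟨r, hrb, rfl⟩ := List.mem_map.mp hx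
        obtain ⟨i, hi, rfl⟩ := List.mem_iff_getElem.mp hrb
        rw [hbget i hi] at hne
        exact ⟨R0 + i, by rw [hblen] at hi; omega, hne⟩
      · rintro ⟨i, hi, hc⟩
        have hRi : RowT shape i := ⟨hi, _, getD_mem (getD_ne_lt hc) 0, hc⟩
        have h1 : R0 ≤ i := hR0min i hRi
        have h2 : i ≤ R1 := hR1max i hRi
        refine ⟨(shape.getD i []).getD j 0, ?_, hc⟩
        refine List.mem_map.mpr ⟨shape.getD i [], ?_, rfl⟩
        have : block[i - R0]'(by omega) = shape.getD (R0 + (i - R0)) [] :=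
          hbget (i - R0) (by omega)
        rw [show R0 + (i - R0) = i by omega] at this
        rw [← this]
        exact List.getElem_mem _
    have hzcol_of_not : ∀ j, j < w → ¬ ColT shape j →
        zrow ((pyZipT block).getD j []) = true := by
      intro j hj hnc
      rw [hc0get j hj]
      cases hzb : zrow (block.map (fun r => r.getD j 0)) with
      | false => exact absurd ((hcolzrow j).mp hzb) hnc
      | true => rfl
    -- peel the columns
    have hBpeel2 : peel (pyZipT block) =
        ((pyZipT block).drop C0).take (C1 + 1 - C0) := by
      unfold peel
      have hdw : (pyZipT block).dropWhile zrow = (pyZipT block).drop C0 :=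
        dropWhile_eq_drop zrow _ C0 [] (by omega)
          (fun j hj => hzcol_of_not j (by omega) (hC0not j hj))
          (by rw [hc0get C0 hC0lt]; exact (hcolzrow C0).mpr hC0)
      rw [hdw]
      have hmget : ∀ i, i < ((pyZipT block).drop C0).length →
          ((pyZipT block).drop C0).getD i [] = (pyZipT block).getD (C0 + i) [] := by
        intro i h
        rw [List.getD_eq_getElem _ _ h, List.getElem_drop,
          List.getD_eq_getElem _ _ (by simp at h ⊢; omega)]
      have hdw2 : ((pyZipT block).drop C0).reverse.dropWhile zrow =
          ((pyZipT block).drop C0).reverse.drop (w - 1 - C1) := by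
        apply dropWhile_eq_drop zrow _ _ []
        · simp [hc0len]; omega
        · intro i hi
          rw [getD_reverse _ _ _ (by simp [hc0len]; omega),
            hmget _ (by simp [hc0len]; omega)]
          apply hzcol_of_not _ (by simp [hc0len]; omega)
          apply hC1not
          simp [hc0len]
          omega
        · rw [getD_reverse _ _ _ (by simp [hc0len]; omega),
            hmget _ (by simp [hc0len]; omega)]
          have he : C0 + (((pyZipT block).drop C0).length - 1 - (w - 1 - C1)) = C1 := by
            simp [hc0len]; omega
          rw [he, hc0get C1 hC1lt]
          exact (hcolzrow C1).mpr hC1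
      rw [hdw2, List.drop_reverse, List.reverse_reverse]
      have he2 : ((pyZipT block).drop C0).length - (w - 1 - C1) = C1 + 1 - C0 := by
        simp [hc0len]; omega
      rw [he2]
    set cols := ((pyZipT block).drop C0).take (C1 + 1 - C0) with hcols_def
    have hcolslen : cols.length = C1 + 1 - C0 := by
      rw [hcols_def]
      simp [hc0len]
      omega
    have hcolsget : ∀ (t : Nat) (h : t < cols.length),
        cols[t] = block.map (fun r => r.getD (C0 + t) 0) := by
      intro t h
      have h' : t < (((pyZipT block).drop C0).take (C1 + 1 - C0)).length := h
      calc cols[t] = (((pyZipT block).drop C0).take (C1 + 1 - C0))[t]'h' := rfl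
        _ = block.map (fun r => r.getD (C0 + t) 0) := by
          rw [List.getElem_take, List.getElem_drop,
            ← hc0get (C0 + t) (by rw [hcolslen] at h; omega),
            List.getD_eq_getElem _ _ (by rw [hc0len]; rw [hcolslen] at h; omega)]
    have hcolsne : cols ≠ [] := by
      intro hcon
      rw [hcon] at hcolslen
      simp at hcolslen
      omega
    have hcolsw : ∀ c ∈ cols, c.length = block.length := by
      intro c hc
      obtain ⟨t, ht, rfl⟩ := List.mem_iff_getElem.mp hc
      rw [hcolsget t ht]
      simp
    -- zip back and compare elementwise
    simp only [normalize_shape_py_alt, hBpeel, if_neg hbne, hBpeel2]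
    rw [pyZipT_eq cols block.length hcolsne hcolsw]
    apply List.ext_getElem
    · simp
    · intro i h1 h2
      simp only [List.getElem_map, List.getElem_range]
      have hiL : i < block.length := by simpa using h1
      apply List.ext_getElem
      · have : block[i].length = w := hblock_mem _ (List.getElem_mem hiL)
        simp [hcolslen, this]
        omega
      · intro t ht1 ht2
        have hwlen : block[i].length = w := hblock_mem _ (List.getElem_mem hiL)
        have htk : t < C1 + 1 - C0 := by
          simp [hwlen] at ht1
          omega
        simp only [List.getElem_take, List.getElem_drop, List.getElem_map]
        rw [List.getD_eq_getElem (cols[t]'(by rw [hcolslen]; omega)) _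
          (by rw [hcolsget t (by rw [hcolslen]; omega)]; simpa using hiL)]
        have : (cols[t]'(by rw [hcolslen]; omega))[i]'(by
            rw [hcolsget t (by rw [hcolslen]; omega)]; simpa using hiL) =
            block[i].getD (C0 + t) 0 := by
          have hct := hcolsget t (by rw [hcolslen]; omega)
          simp only [hct, List.getElem_map]
        rw [this, List.getD_eq_getElem _ _ (by rw [hwlen]; omega)]
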